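-- pv_equiv track=rewrite | github.com/aviswerdlow/k4 | 04_EXPERIMENTS/phase3_zone/key_fit/path_transforms.py | ring24_inverse
-- ===== SOURCE A (Python) =====
-- def ring24_inverse(text: str) -> str:
--     """
--     Inverse of Ring24 path
--     Special handling for K4's 97 characters
--     """
--     n = len(text)
--     rows = 4
--     cols = 24
--     grid_size = rows * cols  # 96
--
--     # Handle extra character(s) if present
--     extra = ""
--     if n > grid_size:
--         extra = text[grid_size:]
--         text = text[:grid_size]
--
--     # Initialize grid
--     grid = [['X'] * cols for _ in range(rows)]
--
--     # Place characters in ring pattern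
--     idx = 0
--
--     # Outer ring
--     for c in range(cols):
--         if idx < len(text):
--             grid[0][c] = text[idx]
--             idx += 1
--     for r in range(1, rows):
--         if idx < len(text):
--             grid[r][cols-1] = text[idx]
--             idx += 1
--     for c in range(cols-2, -1, -1):
--         if idx < len(text):
--             grid[rows-1][c] = text[idx]
--             idx += 1
--     for r in range(rows-2, 0, -1):
--         if idx < len(text):
--             grid[r][0] = text[idx]
--             idx += 1
--
--     # Inner rings
--     if rows > 2 and cols > 2:
--         for c in range(1, cols-1):
--             if idx < len(text):
--                 grid[1][c] = text[idx]
--                 idx += 1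
--         for c in range(cols-2, 0, -1):
--             if idx < len(text):
--                 grid[2][c] = text[idx]
--                 idx += 1
--
--     # Read column by column
--     result = []
--     for c in range(cols):
--         for r in range(rows):
--             result.append(grid[r][c])
--
--     # Add back the extra character(s)
--     result_text = ''.join(result)
--     if extra:
--         result_text += extra
--
--     return result_text[:n]
-- ===== SOURCE B (Python) =====
-- def ring24_inverse(text: str) -> str:
--     """Closed-form re-implementation: each output cell's source index is computed
--     arithmetically from its (row, column) coordinates; no traversal, no grid."""
--     n = len(text)
--
--     def src(r: int, c: int) -> int:
--         # ring step that lands on cell (r, c) of the 4x24 grid, as a direct formula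
--         if r == 0:
--             return c            # top edge, left to right
--         if c == 23:
--             return 23 + r       # right edge, top to bottom
--         if r == 3:
--             return 49 - c       # bottom edge, right to left
--         if c == 0:
--             return 52 - r       # left edge, bottom to top
--         if r == 1:
--             return 51 + c       # inner row 1, left to right
--         return 96 - c           # inner row 2, right to left
--
--     m = min(n, 96)
--     out = ''.join(
--         text[k] if (k := src(p % 4, p // 4)) < m else 'X'
--         for p in range(96)
--     )
--     return (out + text[96:])[:n]
-- ===== Notes on version B (the rewrite author's own statement) =====
-- stated objective: alternative
-- what changed: Replaces A's simulation (six conditional ring-write loops filling a 2D grid, then a column-major read pass) by a closed-form case formula that computes each output cell's source index directly from its row/column coordinates, with no traversal, grid or table.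
import Mathlib
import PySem

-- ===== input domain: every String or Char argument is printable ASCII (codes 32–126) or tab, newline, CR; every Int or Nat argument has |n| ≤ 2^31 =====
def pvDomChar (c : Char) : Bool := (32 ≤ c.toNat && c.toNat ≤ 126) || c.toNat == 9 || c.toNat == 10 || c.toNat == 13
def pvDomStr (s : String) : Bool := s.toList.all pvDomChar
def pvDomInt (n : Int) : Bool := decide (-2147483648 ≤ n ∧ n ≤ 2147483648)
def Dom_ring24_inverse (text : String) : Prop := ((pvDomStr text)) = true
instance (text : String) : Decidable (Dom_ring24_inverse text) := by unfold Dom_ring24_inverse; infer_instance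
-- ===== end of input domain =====

-- B replaces A's grid-filling ring simulation by a closed-form per-cell source-index
-- formula (objective: alternative).

-- ===== PORT A =====
-- grid[r][c] read / write on the list-of-lists grid ('X' default is A's initial fill char)
def getCellA (g : List (List Char)) (r c : Nat) : Char := (g.getD r []).getD c 'X'
def setCellA (g : List (List Char)) (r c : Nat) (ch : Char) : List (List Char) :=
  g.set r ((g.getD r []).set c ch)

-- the six ring-placement loops of A, state = (grid, idx); ranges written as the
-- Nat lists Python's range produces: range(24), range(1,4), range(22,-1,-1),
-- range(2,0,-1), range(1,23), range(22,0,-1)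
def loopsA (t : List Char) : List (List Char) × Nat :=
  let grid0 : List (List Char) := List.replicate 4 (List.replicate 24 'X')
  let st1 := (List.range 24).foldl
    (fun st c => if st.2 < t.length then (setCellA st.1 0 c (t.getD st.2 'X'), st.2 + 1) else st)
    (grid0, 0)
  let st2 := (List.range' 1 3).foldl
    (fun st r => if st.2 < t.length then (setCellA st.1 r 23 (t.getD st.2 'X'), st.2 + 1) else st)
    st1
  let st3 := ((List.range 23).reverse).foldl
    (fun st c => if st.2 < t.length then (setCellA st.1 3 c (t.getD st.2 'X'), st.2 + 1) else st)
    st2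
  let st4 := ((List.range' 1 2).reverse).foldl
    (fun st r => if st.2 < t.length then (setCellA st.1 r 0 (t.getD st.2 'X'), st.2 + 1) else st)
    st3
  let st5 := (List.range' 1 22).foldl
    (fun st c => if st.2 < t.length then (setCellA st.1 1 c (t.getD st.2 'X'), st.2 + 1) else st)
    st4
  ((List.range' 1 22).reverse).foldl
    (fun st c => if st.2 < t.length then (setCellA st.1 2 c (t.getD st.2 'X'), st.2 + 1) else st)
    st5

def ring24_inverse (text : String) : String :=
  let s := text.toList
  let n := s.length
  let gridSize := 96          -- rows * cols = 4 * 24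
  let extra := if n > gridSize then s.drop gridSize else []
  let t := if n > gridSize then s.take gridSize else s
  let g := (loopsA t).1
  -- read column by column, appending one cell at a time as A does
  let result := (List.range 24).foldl
    (fun acc c => (List.range 4).foldl (fun acc2 r => acc2 ++ [getCellA g r c]) acc)
    []
  let resultText := if extra ≠ [] then result ++ extra else result
  String.ofList (resultText.take n)

-- ===== PORT B =====
-- the ring step that lands on cell (r, c): Source B's closed-form case formula
def srcB (r c : Nat) : Nat :=
  if r == 0 then c
  else if c == 23 then 23 + r
  else if r == 3 then 49 - c
  else if c == 0 then 52 - r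
  else if r == 1 then 51 + c
  else 96 - c

def ring24_inverse_alt (text : String) : String :=
  let s := text.toList
  let n := s.length
  let m := min n 96
  let out := (List.range 96).map (fun p =>
    let k := srcB (p % 4) (p / 4)
    if k < m then s.getD k 'X' else 'X')
  String.ofList ((out ++ s.drop 96).take n)

-- ===== PRECONDITION & SPEC =====
def Spec_ring24_inverse (text : String) (out : String) : Prop := out = ring24_inverse_alt text
instance (text : String) (out : String) : Decidable (Spec_ring24_inverse text out) := by unfold Spec_ring24_inverse; infer_instance

-- ===== CLAIM (what is proved, stated in full; the proofs are below) =====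
def Claim_equal_ring24_inverse : Prop := ∀ (text : String), Dom_ring24_inverse text → Spec_ring24_inverse text (ring24_inverse text)

-- ===== LEMMAS AND PROOFS =====

-- A's six loops, seen as one fold over the concatenated list of visited cells
def ringL : List (Nat × Nat) :=
  (List.range 24).map (fun c => (0, c))
  ++ (List.range' 1 3).map (fun r => (r, 23))
  ++ ((List.range 23).reverse).map (fun c => (3, c))
  ++ ((List.range' 1 2).reverse).map (fun r => (r, 0))
  ++ (List.range' 1 22).map (fun c => (1, c))
  ++ ((List.range' 1 22).reverse).map (fun c => (2, c))

def stepF (t : List Char) (st : List (List Char) × Nat) (rc : Nat × Nat) : List (List Char) × Nat :=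
  if st.2 < t.length then (setCellA st.1 rc.1 rc.2 (t.getD st.2 'X'), st.2 + 1) else st

def ShapeG (g : List (List Char)) : Prop := g.length = 4 ∧ ∀ row ∈ g, row.length = 24

lemma loopsA_eq_foldl (t : List Char) :
    loopsA t = ringL.foldl (stepF t) (List.replicate 4 (List.replicate 24 'X'), 0) := by
  simp [loopsA, ringL, stepF, List.foldl_append, List.foldl_map, List.foldr_map]

lemma shape_setCellA {g : List (List Char)} (h : ShapeG g) (r c : Nat) (ch : Char) :
    ShapeG (setCellA g r c ch) := by
  obtain ⟨h1, h2⟩ := h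
  by_cases hr : r < g.length
  · refine ⟨by simp [setCellA, h1], ?_⟩
    intro row hrow
    rcases List.mem_or_eq_of_mem_set hrow with hm | hm
    · exact h2 _ hm
    · subst hm
      rw [List.length_set]
      have hrow' : g.getD r [] = g[r] := by
        simp [List.getD_eq_getElem?_getD, List.getElem?_eq_getElem hr]
      rw [hrow']; exact h2 _ (List.getElem_mem hr)
  · have : setCellA g r c ch = g := by
      unfold setCellA; exact List.set_eq_of_length_le (by omega)
    rw [this]; exact ⟨h1, h2⟩

lemma getCellA_setCellA_self {g : List (List Char)} (h : ShapeG g) {r c : Nat}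
    (hr : r < 4) (hc : c < 24) (ch : Char) :
    getCellA (setCellA g r c ch) r c = ch := by
  obtain ⟨h1, h2⟩ := h
  have hrl : r < g.length := by omega
  have hlen : (g[r]?.getD []).length = 24 := by
    rw [List.getElem?_eq_getElem hrl]; exact h2 _ (List.getElem_mem hrl)
  simp only [getCellA, setCellA, List.getD_eq_getElem?_getD]
  rw [List.getElem?_set_self hrl, Option.getD_some, List.getElem?_set_self (by omega),
      Option.getD_some]

lemma getCellA_setCellA_ne {g : List (List Char)} {r c r' c' : Nat}
    (hne : (r, c) ≠ (r', c')) (ch : Char) :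
    getCellA (setCellA g r c ch) r' c' = getCellA g r' c' := by
  simp only [getCellA, setCellA, List.getD_eq_getElem?_getD]
  by_cases hr : r = r'
  · subst hr
    have hcc : c ≠ c' := by intro h; exact hne (by rw [h])
    by_cases hrl : r < g.length
    · rw [List.getElem?_set_self hrl, Option.getD_some, List.getElem?_set_ne hcc]
    · rw [List.set_eq_of_length_le (by omega)]
  · rw [List.getElem?_set_ne hr]

lemma foldl_step_getCell (t : List Char) (ps : List (Nat × Nat)) :
    ∀ (g : List (List Char)) (idx : Nat) (r c : Nat),
      ShapeG g → ps.Nodup → (∀ p ∈ ps, p.1 < 4 ∧ p.2 < 24) → r < 4 → c < 24 →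
      getCellA ((ps.foldl (stepF t) (g, idx)).1) r c =
        if (r, c) ∈ ps then
          (if idx + ps.idxOf (r, c) < t.length then t.getD (idx + ps.idxOf (r, c)) 'X'
           else getCellA g r c)
        else getCellA g r c := by
  induction ps with
  | nil => intro g idx r c _ _ _ _ _; simp
  | cons a tl ih =>
    intro g idx r c hg hnd hb hr hc
    obtain ⟨hnd1, hnd2⟩ := List.nodup_cons.mp hnd
    have hba := hb a (List.mem_cons_self ..)
    rw [List.foldl_cons]
    by_cases hidx : idx < t.length
    · have hstep : stepF t (g, idx) a = (setCellA g a.1 a.2 (t.getD idx 'X'), idx + 1) := by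
        simp [stepF, hidx]
      rw [hstep]
      have hg' : ShapeG (setCellA g a.1 a.2 (t.getD idx 'X')) := shape_setCellA hg _ _ _
      rw [ih _ _ r c hg' hnd2 (fun p hp => hb p (List.mem_cons_of_mem _ hp)) hr hc]
      by_cases heq : (r, c) = a
      · subst heq
        have hnm : (r, c) ∉ tl := hnd1
        simp only [hnm, if_false, List.mem_cons, true_or, if_true,
          List.idxOf_cons_self, Nat.add_zero, hidx, if_true]
        exact getCellA_setCellA_self hg hr hc _
      · have hset := getCellA_setCellA_ne (g := g) (r := a.1) (c := a.2)
          (r' := r) (c' := c) (by intro h; exact heq (by rw [← h])) (t.getD idx 'X')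
        by_cases hmem : (r, c) ∈ tl
        · have hio : List.idxOf (r, c) (a :: tl) = (List.idxOf (r, c) tl).succ :=
            List.idxOf_cons_ne _ (fun h => heq h.symm)
          simp only [hmem, if_true, List.mem_cons, or_true, hio, hset]
          have : idx + 1 + List.idxOf (r, c) tl = idx + (List.idxOf (r, c) tl).succ := by omega
          rw [this]
        · have hnm : (r, c) ∉ a :: tl := by
            simp [List.mem_cons, heq, hmem]
          simp only [hmem, if_false, hnm, if_false, hset]
    · have hstep : stepF t (g, idx) a = (g, idx) := by simp [stepF, hidx]
      rw [hstep, ih _ _ r c hg hnd2 (fun p hp => hb p (List.mem_cons_of_mem _ hp)) hr hc]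
      have hge : ∀ j : Nat, ¬ (idx + j < t.length) := by intro j; omega
      by_cases hmem : (r, c) ∈ tl
      · have : (r, c) ∈ a :: tl := List.mem_cons_of_mem _ hmem
        simp only [hmem, if_true, this, if_true, hge, if_false]
      · by_cases heq : (r, c) = a
        · subst heq
          simp only [hmem, if_false, List.mem_cons, true_or, if_true, hge, if_false]
        · have hnm : (r, c) ∉ a :: tl := by simp [List.mem_cons, heq, hmem]
          simp only [hmem, if_false, hnm, if_false]

-- the concrete facts about ringL / srcB / the initial grid, all decidable:
-- srcB (r, c) is exactly the position of (r, c) in A's ring traversal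
lemma ringL_facts :
    ringL.Nodup ∧ (∀ p ∈ ringL, p.1 < 4 ∧ p.2 < 24) ∧
    (∀ r < 4, ∀ c < 24, ((r, c) ∈ ringL ∧ ringL.idxOf (r, c) = srcB r c ∧
      getCellA (List.replicate 4 (List.replicate 24 'X')) r c = 'X')) := by decide

lemma gridCell (t : List Char) {r c : Nat} (hr : r < 4) (hc : c < 24) :
    getCellA (loopsA t).1 r c =
      (if srcB r c < t.length then t.getD (srcB r c) 'X' else 'X') := by
  obtain ⟨hnd, hb, hall⟩ := ringL_facts
  obtain ⟨hmem, hidx, hx⟩ := hall r hr c hc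
  rw [loopsA_eq_foldl,
      foldl_step_getCell t ringL _ 0 r c (by constructor <;> simp) hnd hb hr hc]
  simp only [hmem, if_true, Nat.zero_add, hidx, hx]

lemma flat_to_map {α : Type} (h : Nat → α) (n : Nat) :
    (List.range n).flatMap (fun c => (List.range 4).map (fun r => h (c * 4 + r))) =
    (List.range (n * 4)).map h := by
  induction n with
  | zero => simp
  | succ n ih =>
    rw [show List.range (n + 1) = List.range n ++ [n] from List.range_succ,
        List.flatMap_append, ih]
    have : (n + 1) * 4 = n * 4 + 4 := by ring
    rw [this, List.range_add, List.map_append, List.map_map]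
    simp [List.flatMap]

-- ===== VERDICT (by name: the statement is the Claim_ definition above) =====
set_option maxHeartbeats 1000000 in
theorem ring24_inverse_spec : Claim_equal_ring24_inverse := by
  intro text _
  unfold Spec_ring24_inverse
  simp only [ring24_inverse, ring24_inverse_alt]
  set s := text.toList with hs
  set n := s.length with hn
  -- A's truncated text equals s.take 96
  have ht : (if n > 96 then s.take 96 else s) = s.take 96 := by
    by_cases h : n > 96
    · simp [h]
    · simp [h, List.take_of_length_le (by omega : s.length ≤ 96)]
  rw [ht]
  -- both 96-char fronts are the same map over range 96
  have hfront :
      (List.range 24).foldl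
        (fun acc c => (List.range 4).foldl
          (fun acc2 r => acc2 ++ [getCellA (loopsA (s.take 96)).1 r c]) acc) [] =
      (List.range 96).map (fun p =>
        let k := srcB (p % 4) (p / 4)
        if k < min n 96 then s.getD k 'X' else 'X') := by
    simp only [PySem.List.foldl_append_singleton_eq_map,
      PySem.List.foldl_append_eq_flatMap, List.nil_append]
    have h2 : (List.range 24).flatMap
        (fun c => (List.range 4).map (fun r => getCellA (loopsA (s.take 96)).1 r c)) =
        (List.range 24).flatMap (fun c => (List.range 4).map (fun r =>
          (fun p => let k := srcB (p % 4) (p / 4)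
            if k < min n 96 then s.getD k 'X' else 'X') (c * 4 + r))) := by
      apply List.flatMap_congr
      intro c hc
      apply List.map_congr_left
      intro r hr
      have hr4 : r < 4 := List.mem_range.mp hr
      have hc24 : c < 24 := List.mem_range.mp hc
      rw [gridCell (s.take 96) hr4 hc24]
      have hmod : (c * 4 + r) % 4 = r := by omega
      have hdiv : (c * 4 + r) / 4 = c := by omega
      have hk96 : srcB r c < 96 := by
        have := (ringL_facts.2.2 r hr4 c hc24).2.1
        rw [← this]
        calc ringL.idxOf (r, c) < ringL.length :=
              List.idxOf_lt_length_of_mem (ringL_facts.2.2 r hr4 c hc24).1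
          _ = 96 := by decide
      have hlen : (s.take 96).length = min n 96 := by
        rw [List.length_take]; omega
      simp only [hmod, hdiv, hlen]
      by_cases hkm : srcB r c < min n 96
      · rw [if_pos hkm, if_pos hkm]
        have : (s.take 96).getD (srcB r c) 'X' = s.getD (srcB r c) 'X' := by
          simp [List.getD_eq_getElem?_getD, hk96]
        rw [this]
      · rw [if_neg hkm, if_neg hkm]
    rw [h2, flat_to_map (fun p =>
      let k := srcB (p % 4) (p / 4)
      if k < min n 96 then s.getD k 'X' else 'X') 24]
  rw [hfront]
  -- the extra tails agree
  by_cases h96 : n > 96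
  · simp only [h96, if_true]
    have hne : s.drop 96 ≠ [] := by
      intro h
      have := List.length_drop (l := s) (i := 96)
      rw [h] at this
      simp at this
      omega
    rw [if_pos hne]
  · simp only [h96, if_false]
    have hd : s.drop 96 = [] := List.drop_eq_nil_of_le (by omega)
    rw [hd, List.append_nil]
    simp
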